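-- pv_equiv track=rewrite | github.com/selfreferencing/erdos-86-lean | covering_search_v5.py | get_residues_for_M
-- ===== SOURCE A (Python) =====
-- def divisors(n):
--     if n <= 0: return []
--     small, large = [], []
--     i = 1
--     while i * i <= n:
--         if n % i == 0:
--             small.append(i)
--             if i != n // i:
--                 large.append(n // i)
--         i += 1
--     return small + large[::-1]
--
-- def get_residues_for_M(M):
--     k = (M + 1) // 4
--     if 4 * k - 1 != M:
--         return set()
--     seen = set()
--     for a in divisors(k):
--         rem = k // a
--         for s in divisors(rem):
--             r = rem // s
--             res = (-4 * a * s * s) % M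
--             seen.add(res)
--     return seen
-- ===== SOURCE B (Python) =====
-- def isqrt(n):
--     r = 0
--     while (r + 1) * (r + 1) <= n:
--         r += 1
--     return r
--
-- def divisors_sorted(n):
--     # staged comprehensions: divisors up to sqrt(n), then their cofactors
--     if n <= 0:
--         return []
--     small = [i for i in range(1, isqrt(n) + 1) if n % i == 0]
--     return small + [n // i for i in reversed(small) if i != n // i]
--
-- def get_residues_for_M(M):
--     # one divisor table for k plus an a*s | k filter, instead of A's
--     # per-a re-invocation of trial division on k//a
--     k = (M + 1) // 4
--     if 4 * k - 1 != M:
--         return set()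
--     D = divisors_sorted(k)
--     seen = set()
--     for a in D:
--         for s in [s for s in D if k % (a * s) == 0]:
--             seen.add((-4 * a * s * s) % M)
--     return seen
-- ===== Notes on version B (the rewrite author's own statement) =====
-- stated objective: alternative
-- what changed: B builds the divisor table of k once (via an explicit isqrt plus two staged list comprehensions instead of A's single while-loop with two accumulators) and enumerates pairs (a,s) over that one table, keeping a pair exactly when a*s divides k, instead of A's per-a re-invocation of trial division on k//a.
import Mathlib
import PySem

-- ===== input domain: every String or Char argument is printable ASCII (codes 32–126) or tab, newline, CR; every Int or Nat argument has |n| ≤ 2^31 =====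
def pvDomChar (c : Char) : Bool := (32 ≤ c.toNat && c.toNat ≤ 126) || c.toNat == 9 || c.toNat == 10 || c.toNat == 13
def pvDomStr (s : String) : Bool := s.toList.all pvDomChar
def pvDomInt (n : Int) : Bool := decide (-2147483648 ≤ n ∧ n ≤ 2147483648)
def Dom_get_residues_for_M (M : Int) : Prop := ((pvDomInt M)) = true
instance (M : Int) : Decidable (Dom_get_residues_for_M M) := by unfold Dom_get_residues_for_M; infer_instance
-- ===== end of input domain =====

-- B builds the divisor table of k once (isqrt + two staged comprehensions instead of A's
-- while-loop with two accumulators) and filters pairs (a,s) by a*s | k, instead of A's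
-- per-a re-invocation of trial division on k//a (alternative decomposition, same cost).

-- ===== PORT A =====
-- the while loop is ported with fuel n.toNat + 1 (the loop runs while i*i ≤ n, so i ≤ n);
-- large[::-1] is ported as List.reverse (exact for a full reversed slice).
def divisorsLoop (n : Int) : Nat → Int → List Int → List Int → List Int × List Int
  | 0, _, small, large => (small, large)
  | fuel+1, i, small, large =>
    if i * i ≤ n then
      (if PySem.Int.mod n i == 0 then
        divisorsLoop n fuel (i+1) (small ++ [i])
          (if i != PySem.Int.floordiv n i then large ++ [PySem.Int.floordiv n i] else large)
      else
        divisorsLoop n fuel (i+1) small large)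
    else (small, large)

def pyDivisors (n : Int) : List Int :=
  if n ≤ 0 then []
  else
    let p := divisorsLoop n (n.toNat + 1) 1 [] []
    p.1 ++ p.2.reverse

def get_residues_for_M (M : Int) : List Int :=
  let k := PySem.Int.floordiv (M + 1) 4
  if 4 * k - 1 != M then []
  else
    (pyDivisors k).foldl (fun seen a =>
      let rem := PySem.Int.floordiv k a
      (pyDivisors rem).foldl (fun seen s =>
        let _r := PySem.Int.floordiv rem s
        PySem.Set.add seen (PySem.Int.mod (-4 * a * s * s) M)) seen) []

-- ===== PORT B =====
-- isqrt's while loop is ported with fuel n.toNat (the loop runs at most isqrt n ≤ n times)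
def isqrtLoop (n : Int) : Nat → Int → Int
  | 0, r => r
  | fuel+1, r => if (r + 1) * (r + 1) ≤ n then isqrtLoop n fuel (r + 1) else r

def pyIsqrt (n : Int) : Int := isqrtLoop n n.toNat 0

def divisors_sorted (n : Int) : List Int :=
  if n ≤ 0 then []
  else
    let small := (PySem.List.pyRange 1 (pyIsqrt n + 1) 1).filter (fun i => PySem.Int.mod n i == 0)
    small ++ (small.reverse.filter (fun i => i != PySem.Int.floordiv n i)).map
      (fun i => PySem.Int.floordiv n i)

def get_residues_for_M_alt (M : Int) : List Int :=
  let k := PySem.Int.floordiv (M + 1) 4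
  if 4 * k - 1 != M then []
  else
    let D := divisors_sorted k
    D.foldl (fun seen a =>
      (D.filter (fun s => PySem.Int.mod k (a * s) == 0)).foldl (fun seen s =>
        PySem.Set.add seen (PySem.Int.mod (-4 * a * s * s) M)) seen) []

-- ===== PRECONDITION & SPEC =====
def Spec_get_residues_for_M (M : Int) (out : List Int) : Prop := out = get_residues_for_M_alt M
instance (M : Int) (out : List Int) : Decidable (Spec_get_residues_for_M M out) := by unfold Spec_get_residues_for_M; infer_instance

-- ===== CLAIM (what is proved, stated in full; the proofs are below) =====
def Claim_equal_get_residues_for_M : Prop := ∀ (M : Int), Dom_get_residues_for_M M → Spec_get_residues_for_M M (get_residues_for_M M)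

-- ===== LEMMAS AND PROOFS =====

-- [i, i+1, …, i+m-1]
def intRangeFrom : Nat → Int → List Int
  | 0, _ => []
  | m+1, i => i :: intRangeFrom m (i+1)

theorem mem_intRangeFrom : ∀ (m : Nat) (i x : Int), x ∈ intRangeFrom m i ↔ i ≤ x ∧ x < i + m := by
  intro m
  induction m with
  | zero => intro i x; simp [intRangeFrom]; try omega
  | succ m ih => intro i x; simp [intRangeFrom, ih]; try omega

theorem intRangeFrom_eq_pyRange : ∀ (m : Nat) (i : Int),
    intRangeFrom m i = PySem.List.pyRange i (i + m) 1 := by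
  intro m
  induction m with
  | zero => intro i; simp [intRangeFrom, PySem.List.pyRange_one_eq_nil]
  | succ m ih =>
    intro i
    rw [PySem.List.pyRange_one_cons (by omega)]
    simp only [intRangeFrom, ih (i+1)]
    congr 1
    push_cast
    ring_nf

theorem pairwise_intRangeFrom : ∀ (m : Nat) (i : Int), (intRangeFrom m i).Pairwise (· < ·) := by
  intro m
  induction m with
  | zero => intro i; simp [intRangeFrom]
  | succ m ih =>
    intro i
    refine List.Pairwise.cons ?_ (ih (i+1))
    intro x hx
    have := (mem_intRangeFrom m (i+1) x).1 hx
    omega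

-- closed forms of the two accumulators of A's trial-division loop, started at i
def smallOf (n i : Int) : List Int :=
  (intRangeFrom ((n + 1 - i).toNat) i).filter
    (fun d => decide (d * d ≤ n) && (PySem.Int.mod n d == 0))

def largeOf (n i : Int) : List Int :=
  ((intRangeFrom ((n + 1 - i).toNat) i).filter
    (fun d => decide (d * d ≤ n) && (PySem.Int.mod n d == 0) && (d != PySem.Int.floordiv n d))).map
    (fun d => PySem.Int.floordiv n d)

theorem divisorsLoop_append (n : Int) :
    ∀ (fuel : Nat) (i : Int) (small large : List Int),
      divisorsLoop n fuel i small large =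
        (small ++ (divisorsLoop n fuel i [] []).1, large ++ (divisorsLoop n fuel i [] []).2) := by
  intro fuel
  induction fuel with
  | zero => intro i small large; simp [divisorsLoop]
  | succ fuel ih =>
    intro i small large
    simp only [divisorsLoop]
    by_cases h : i * i ≤ n
    · simp only [if_pos h]
      by_cases hm : (PySem.Int.mod n i == 0) = true
      · simp only [hm, if_true]
        by_cases hne : (i != PySem.Int.floordiv n i) = true
        · simp only [hne, if_true]
          rw [ih (i+1) (small ++ [i]) (large ++ [PySem.Int.floordiv n i]),
              ih (i+1) ([] ++ [i]) ([] ++ [PySem.Int.floordiv n i])]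
          simp
        · simp only [Bool.not_eq_true] at hne
          simp only [hne, Bool.false_eq_true, if_false]
          rw [ih (i+1) (small ++ [i]) large, ih (i+1) ([] ++ [i]) []]
          simp
      · simp only [Bool.not_eq_true] at hm
        simp only [hm, Bool.false_eq_true, if_false]
        rw [ih (i+1) small large]
    · simp [h]

theorem divisorsLoop_eq (n : Int) :
    ∀ (fuel : Nat) (i : Int), 1 ≤ i → (n + 1 - i).toNat ≤ fuel →
      divisorsLoop n fuel i [] [] = (smallOf n i, largeOf n i) := by
  intro fuel
  induction fuel with
  | zero =>
    intro i hi hf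
    have h0 : (n + 1 - i).toNat = 0 := by omega
    simp [divisorsLoop, smallOf, largeOf, h0, intRangeFrom]
  | succ fuel ih =>
    intro i hi hf
    by_cases h : i * i ≤ n
    · have hin : i ≤ n := le_trans (le_mul_of_one_le_left (by omega) hi) h
      have hcand : (n + 1 - i).toNat = (n + 1 - (i+1)).toNat + 1 := by omega
      have hcons : intRangeFrom ((n + 1 - i).toNat) i
          = i :: intRangeFrom ((n + 1 - (i+1)).toNat) (i+1) := by
        rw [hcand]; rfl
      have hf' : (n + 1 - (i+1)).toNat ≤ fuel := by omega
      by_cases hm : (PySem.Int.mod n i == 0) = true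
      · simp only [divisorsLoop, if_pos h, hm, if_true]
        rw [divisorsLoop_append n fuel (i+1), ih (i+1) (by omega) hf']
        simp only [smallOf, largeOf, hcons, List.filter_cons]
        have hd : (decide (i * i ≤ n) && (PySem.Int.mod n i == 0)) = true := by
          simp [h, hm]
        by_cases hne : (i != PySem.Int.floordiv n i) = true
        · simp [hne, h, hm]
        · simp [hne, h, hm]
      · simp only [divisorsLoop, if_pos h, hm]
        rw [ih (i+1) (by omega) hf']
        have hd : (decide (i * i ≤ n) && (PySem.Int.mod n i == 0)) = false := by
          simp [h]; simpa using hm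
        simp only [smallOf, largeOf, hcons, List.filter_cons, hd]
        simp
    · -- loop stops: every remaining candidate d ≥ i has d*d ≥ i*i > n
      have hempty : ∀ d ∈ intRangeFrom ((n + 1 - i).toNat) i,
          ¬ ((decide (d * d ≤ n) && (PySem.Int.mod n d == 0)) = true) := by
        intro d hd
        have hdi := (mem_intRangeFrom _ i d).1 hd
        have : ¬ d * d ≤ n := by nlinarith [hdi.1]
        simp [this]
      have hsm : smallOf n i = [] := by
        unfold smallOf
        exact List.filter_eq_nil_iff.mpr hempty
      have hlg : largeOf n i = [] := by
        unfold largeOf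
        rw [List.filter_eq_nil_iff.mpr (fun d hd hp => hempty d hd (by
          simp only [Bool.and_eq_true] at hp
          simp [hp.1.1, hp.1.2]))]
        rfl
      simp [divisorsLoop, h, hsm, hlg]

theorem mem_smallOf_one (n : Int) (hn : 0 < n) (x : Int) :
    x ∈ smallOf n 1 ↔ 1 ≤ x ∧ x * x ≤ n ∧ x ∣ n := by
  simp only [smallOf, List.mem_filter, mem_intRangeFrom, Bool.and_eq_true, decide_eq_true_eq,
    beq_iff_eq, PySem.Int.mod_eq_zero_iff_dvd]
  constructor
  · rintro ⟨⟨h1, _⟩, h3, h4⟩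
    exact ⟨h1, h3, h4⟩
  · rintro ⟨h1, h2, h3⟩
    have hxn : x ≤ n := Int.le_of_dvd hn h3
    exact ⟨⟨h1, by omega⟩, h2, h3⟩

theorem mem_largeOf_one (n : Int) (hn : 0 < n) (x : Int) :
    x ∈ largeOf n 1 ↔ ∃ e, 1 ≤ e ∧ e * e ≤ n ∧ e ∣ n ∧ e ≠ n / e ∧ x = n / e := by
  simp only [largeOf, List.mem_map, List.mem_filter, mem_intRangeFrom, Bool.and_eq_true,
    decide_eq_true_eq, beq_iff_eq, bne_iff_ne, PySem.Int.mod_eq_zero_iff_dvd, ne_eq]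
  constructor
  · rintro ⟨e, ⟨⟨he1, _⟩, ⟨he3, he4⟩, he5⟩, rfl⟩
    rw [PySem.Int.floordiv_eq_ediv_of_pos (by omega)] at he5 ⊢
    exact ⟨e, he1, he3, he4, he5, rfl⟩
  · rintro ⟨e, he1, he2, he3, he4, rfl⟩
    have hen : e ≤ n := Int.le_of_dvd hn he3
    refine ⟨e, ⟨⟨he1, by omega⟩, ⟨he2, he3⟩, ?_⟩, ?_⟩
    · rw [PySem.Int.floordiv_eq_ediv_of_pos (by omega)]; exact he4
    · rw [PySem.Int.floordiv_eq_ediv_of_pos (by omega)]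

theorem mem_pyDivisors (n : Int) (hn : 0 < n) (d : Int) :
    d ∈ pyDivisors n ↔ 1 ≤ d ∧ d ∣ n := by
  have hnle : ¬ n ≤ 0 := by omega
  have hloop := divisorsLoop_eq n (n.toNat + 1) 1 (by omega) (by omega)
  simp only [pyDivisors, hnle, if_false, hloop, List.mem_append, List.mem_reverse,
    mem_smallOf_one n hn, mem_largeOf_one n hn]
  constructor
  · rintro (⟨h1, _, h3⟩ | ⟨e, he1, he2, he3, _, rfl⟩)
    · exact ⟨h1, h3⟩
    · have hq : n / e * e = n := Int.ediv_mul_cancel he3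
      have hq1 : 1 ≤ n / e := by nlinarith [hq]
      exact ⟨hq1, ⟨e, hq.symm⟩⟩
  · rintro ⟨h1, h2⟩
    by_cases hsq : d * d ≤ n
    · exact Or.inl ⟨h1, hsq, h2⟩
    · right
      obtain ⟨c, hc⟩ := h2
      have hdc : n / d = c := by rw [hc]; exact Int.mul_ediv_cancel_left c (by omega)
      have hc1 : 1 ≤ c := by nlinarith
      have hcd : c < d := by nlinarith
      have hcn : n / c = d := by
        rw [hc, mul_comm]; exact Int.mul_ediv_cancel_left d (by omega)
      exact ⟨c, hc1, by nlinarith, ⟨d, by rw [hc, mul_comm]⟩, by omega, hcn.symm⟩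

theorem pairwise_pyDivisors (n : Int) : (pyDivisors n).Pairwise (· < ·) := by
  by_cases hn : n ≤ 0
  · simp [pyDivisors, hn]
  · have hn' : 0 < n := by omega
    have hloop := divisorsLoop_eq n (n.toNat + 1) 1 (by omega) (by omega)
    simp only [pyDivisors, hn, if_false, hloop]
    rw [List.pairwise_append]
    refine ⟨List.Pairwise.filter _ (pairwise_intRangeFrom _ _), ?_, ?_⟩
    · rw [List.pairwise_reverse]
      unfold largeOf
      rw [List.pairwise_map]
      refine List.Pairwise.imp_of_mem ?_ (List.Pairwise.filter _ (pairwise_intRangeFrom _ _))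
      intro a b hma hmb hab
      simp only [List.mem_filter, mem_intRangeFrom, Bool.and_eq_true, decide_eq_true_eq,
        beq_iff_eq, PySem.Int.mod_eq_zero_iff_dvd] at hma hmb
      obtain ⟨⟨ha1, _⟩, ⟨_, ha3⟩, _⟩ := hma
      obtain ⟨⟨hb1, _⟩, ⟨_, hb3⟩, _⟩ := hmb
      rw [PySem.Int.floordiv_eq_ediv_of_pos (by omega : (0:Int) < a),
        PySem.Int.floordiv_eq_ediv_of_pos (by omega : (0:Int) < b)]
      have hqa : n / a * a = n := Int.ediv_mul_cancel ha3
      have hqb : n / b * b = n := Int.ediv_mul_cancel hb3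
      have hqa1 : 1 ≤ n / a := by nlinarith
      have hqb1 : 1 ≤ n / b := by nlinarith
      nlinarith
    · intro x hx y hy
      rw [List.mem_reverse] at hy
      have hx' := (mem_smallOf_one n hn' x).1 hx
      have hy' := (mem_largeOf_one n hn' y).1 hy
      obtain ⟨hx1, hx2, hx3⟩ := hx'
      obtain ⟨e, he1, he2, he3, he4, rfl⟩ := hy'
      have hq : n / e * e = n := Int.ediv_mul_cancel he3
      have hq1 : 1 ≤ n / e := by nlinarith
      by_contra hlt
      rw [not_lt] at hlt
      have h5 : x ≤ e := by nlinarith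
      have h6 : e ≤ n / e := by nlinarith
      omega

theorem eq_of_pairwise_lt_of_mem_iff :
    ∀ (l₁ l₂ : List Int), l₁.Pairwise (· < ·) → l₂.Pairwise (· < ·) →
      (∀ x, x ∈ l₁ ↔ x ∈ l₂) → l₁ = l₂ := by
  intro l₁
  induction l₁ with
  | nil =>
    intro l₂ _ _ hmem
    cases l₂ with
    | nil => rfl
    | cons b l₂ => exact absurd ((hmem b).2 List.mem_cons_self) List.not_mem_nil
  | cons a l₁ ih =>
    intro l₂ h₁ h₂ hmem
    cases l₂ with
    | nil => exact absurd ((hmem a).1 List.mem_cons_self) List.not_mem_nil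
    | cons b l₂ =>
      have hab : a = b := by
        rcases List.mem_cons.1 ((hmem a).1 List.mem_cons_self) with h | h
        · exact h
        · rcases List.mem_cons.1 ((hmem b).2 List.mem_cons_self) with h' | h'
          · exact h'.symm
          · have hba := (List.pairwise_cons.1 h₁).1 b h'
            have hab' := (List.pairwise_cons.1 h₂).1 a h
            omega
      subst hab
      have htail : ∀ x, x ∈ l₁ ↔ x ∈ l₂ := by
        intro x
        constructor
        · intro hx
          have hax : a < x := (List.pairwise_cons.1 h₁).1 x hx
          rcases List.mem_cons.1 ((hmem x).1 (List.mem_cons_of_mem a hx)) with h | h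
          · omega
          · exact h
        · intro hx
          have hax : a < x := (List.pairwise_cons.1 h₂).1 x hx
          rcases List.mem_cons.1 ((hmem x).2 (List.mem_cons_of_mem a hx)) with h | h
          · omega
          · exact h
      rw [ih l₂ (List.pairwise_cons.1 h₁).2 (List.pairwise_cons.1 h₂).2 htail]

-- bounds of B's incremental isqrt loop
theorem isqrtLoop_spec (n : Int) :
    ∀ (fuel : Nat) (r : Int), 0 ≤ r → r * r ≤ n → (n - r).toNat ≤ fuel →
      0 ≤ isqrtLoop n fuel r ∧ isqrtLoop n fuel r * isqrtLoop n fuel r ≤ n ∧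
        n < (isqrtLoop n fuel r + 1) * (isqrtLoop n fuel r + 1) := by
  intro fuel
  induction fuel with
  | zero =>
    intro r hr0 hrsq hf
    have hnr : n ≤ r := by omega
    simp only [isqrtLoop]
    refine ⟨hr0, hrsq, by nlinarith⟩
  | succ fuel ih =>
    intro r hr0 hrsq hf
    by_cases h : (r + 1) * (r + 1) ≤ n
    · have := ih (r + 1) (by omega) h (by omega)
      simpa [isqrtLoop, h] using this
    · refine ⟨by simpa [isqrtLoop, h] using hr0, ?_, ?_⟩ <;>
        simp [isqrtLoop, h] <;> omega
  
theorem pyIsqrt_spec (n : Int) (hn : 0 < n) :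
    0 ≤ pyIsqrt n ∧ pyIsqrt n * pyIsqrt n ≤ n ∧ n < (pyIsqrt n + 1) * (pyIsqrt n + 1) := by
  exact isqrtLoop_spec n n.toNat 0 le_rfl (by nlinarith) (by omega)

-- B's staged-comprehension divisor list equals A's trial-division divisor list
theorem divisors_sorted_eq (n : Int) : divisors_sorted n = pyDivisors n := by
  by_cases hn : n ≤ 0
  · simp [divisors_sorted, pyDivisors, hn]
  · have hn' : 0 < n := by omega
    obtain ⟨hq0, hq1, hq2⟩ := pyIsqrt_spec n hn'
    set q := pyIsqrt n with hq
    have hqn : q ≤ n := by nlinarith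
    have hloop := divisorsLoop_eq n (n.toNat + 1) 1 (by omega) (by omega)
    -- A's small list is B's small list: past isqrt n the d*d ≤ n test is always false
    have hsplit : intRangeFrom ((n + 1 - 1).toNat) 1
        = PySem.List.pyRange 1 (q + 1) 1 ++ PySem.List.pyRange (q + 1) (n + 1) 1 := by
      rw [intRangeFrom_eq_pyRange]
      have hcast : (1 : Int) + ((n + 1 - 1).toNat : Int) = n + 1 := by omega
      rw [hcast, PySem.List.pyRange_one_append 1 (q + 1) (n + 1) (by omega) (by omega)]
    have hsmall : smallOf n 1
        = (PySem.List.pyRange 1 (q + 1) 1).filter (fun i => PySem.Int.mod n i == 0) := by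
      unfold smallOf
      rw [hsplit, List.filter_append]
      have h2 : (PySem.List.pyRange (q + 1) (n + 1) 1).filter
          (fun d => decide (d * d ≤ n) && (PySem.Int.mod n d == 0)) = [] := by
        refine List.filter_eq_nil_iff.mpr ?_
        intro d hd
        have := (PySem.List.mem_pyRange_one).1 hd
        have : ¬ d * d ≤ n := by nlinarith
        simp [this]
      rw [h2, List.append_nil]
      refine List.filter_congr ?_
      intro d hd
      have := (PySem.List.mem_pyRange_one).1 hd
      have hdd : d * d ≤ n := by nlinarith
      simp [hdd]
    have hlarge : largeOf n 1
        = ((smallOf n 1).filter (fun i => i != PySem.Int.floordiv n i)).map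
            (fun i => PySem.Int.floordiv n i) := by
      unfold largeOf smallOf
      rw [List.filter_filter]
      congr 1
      refine List.filter_congr ?_
      intro d _
      rw [Bool.and_comm]
    simp only [pyDivisors, divisors_sorted, hn, if_false, hloop]
    rw [hsmall.symm, hlarge, List.filter_reverse, List.map_reverse]

-- filtering B's table of divisors of k by a*s | k yields exactly the divisors of k//a
theorem divisors_filter (k a : Int) (hk : 0 < k) (ha : 1 ≤ a) (had : a ∣ k) :
    (pyDivisors k).filter (fun s => PySem.Int.mod k (a * s) == 0)
      = pyDivisors (PySem.Int.floordiv k a) := by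
  have hfd : PySem.Int.floordiv k a = k / a := PySem.Int.floordiv_eq_ediv_of_pos (by omega)
  obtain ⟨c, hc⟩ := had
  have hcpos : 0 < c := by nlinarith
  have hdiv : k / a = c := by rw [hc]; exact Int.mul_ediv_cancel_left c (by omega)
  apply eq_of_pairwise_lt_of_mem_iff
  · exact List.Pairwise.filter _ (pairwise_pyDivisors k)
  · exact pairwise_pyDivisors _
  · intro x
    rw [List.mem_filter, mem_pyDivisors k hk x, hfd, hdiv, mem_pyDivisors c hcpos x]
    simp only [beq_iff_eq, PySem.Int.mod_eq_zero_iff_dvd]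
    constructor
    · rintro ⟨⟨hx1, _⟩, hp⟩
      refine ⟨hx1, ?_⟩
      exact (mul_dvd_mul_iff_left (show a ≠ 0 by omega)).1 (by rw [← hc]; exact hp)
    · rintro ⟨hx1, hx2⟩
      have hxk : x ∣ k := by rw [hc]; exact Dvd.dvd.mul_left hx2 a
      refine ⟨⟨hx1, hxk⟩, ?_⟩
      rw [hc]; exact mul_dvd_mul_left a hx2

-- ===== VERDICT (by name: the statement is the Claim_ definition above) =====
theorem get_residues_for_M_spec : Claim_equal_get_residues_for_M := by
  intro M _
  unfold Spec_get_residues_for_M get_residues_for_M get_residues_for_M_alt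
  set k := PySem.Int.floordiv (M + 1) 4 with hk
  by_cases hg : (4 * k - 1 != M) = true
  · simp only [hg, if_true]
  · simp only [Bool.not_eq_true] at hg
    simp only [hg, Bool.false_eq_true, if_false, divisors_sorted_eq]
    by_cases hkpos : 0 < k
    · apply PySem.List.foldl_congr_mem'
      intro a ha seen
      have hma := (mem_pyDivisors _ hkpos a).1 ha
      rw [divisors_filter _ a hkpos hma.1 hma.2]
    · have hk0 : pyDivisors k = [] := by
        unfold pyDivisors; rw [if_pos (by omega)]
      rw [hk0]
      rfl
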